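-- pv_equiv track=rewrite | github.com/suxrobGM/med-image-scanner | backend/src/application/utils/validators.py | valid_org_name
-- ===== SOURCE A (Python) =====
-- def valid_org_name(name: str) -> bool:
--     """
--     Check if the given organization name is valid.
--     Rules:
--         - The organization name must be at least 4 characters
--         - The organization name must contain only alphanumeric characters, no spaces, and may contain only underscores
--         - The organization name must not start or end with an underscore
--         - The organization name must not start with a digit
--         - The organization name must not contain two or more consecutive underscores
--     Args:
--         name (str): Organization name
--     Returns:
--         bool: True if the organization name is valid, False otherwise
--     """
--     # Check the length
--     if len(name) < 4:
--         return False
--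
--     # Check the first character
--     if name[0].isdigit():
--         return False
--
--     # Check the last character
--     if name[-1] == "_":
--         return False
--
--     # Check the characters
--     for i, char in enumerate(name):
--         if not char.isalnum() and char != "_":
--             return False
--
--         # Check for consecutive underscores
--         if i > 0 and char == "_" and name[i - 1] == "_":
--             return False
--
--     return True
-- ===== SOURCE B (Python) =====
-- # Table-free DFA: one pass over the characters through a 4-state automaton,
-- # accepting iff the run ends in the "after alphanumeric" state and len >= 4.
-- START, ALNUM, UNDER, DEAD = 0, 1, 2, 3
--
-- def _step(state: int, c: str) -> int:
--     if state == DEAD: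
--         return DEAD
--     if state == START and c.isdigit():
--         return DEAD
--     if c.isalnum():
--         return ALNUM
--     if c == "_":
--         return DEAD if state == UNDER else UNDER
--     return DEAD
--
-- def valid_org_name(name: str) -> bool:
--     state = START
--     for c in name:
--         state = _step(state, c)
--     return len(name) >= 4 and state == ALNUM
-- ===== Notes on version B (the rewrite author's own statement) =====
-- stated objective: alternative
-- what changed: Replaces A's guard sequence plus index-based enumerate loop by a single left-to-right run of a 4-state finite automaton (start / after-alnum / after-underscore / dead) whose final state decides acceptance; the first-digit, trailing-underscore, charset and double-underscore rules all fall out of the transition function instead of separate checks.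
import Mathlib
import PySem

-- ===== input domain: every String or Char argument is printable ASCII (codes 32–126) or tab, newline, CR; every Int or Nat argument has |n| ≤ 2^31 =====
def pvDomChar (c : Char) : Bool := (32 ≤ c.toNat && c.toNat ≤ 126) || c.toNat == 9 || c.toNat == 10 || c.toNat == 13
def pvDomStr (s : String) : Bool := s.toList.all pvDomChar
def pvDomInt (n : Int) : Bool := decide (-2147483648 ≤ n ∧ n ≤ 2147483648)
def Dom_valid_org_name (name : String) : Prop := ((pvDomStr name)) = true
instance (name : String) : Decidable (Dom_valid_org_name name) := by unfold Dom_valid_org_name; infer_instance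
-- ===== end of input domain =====

-- B replaces A's guard sequence and index-based loop by a single run of a 4-state automaton (alternative decomposition, same cost).

-- ===== PORT A =====
-- the enumerate loop of A: early return on an invalid char or on a '_' whose predecessor (name[i-1]) is '_'
def vonLoopA (cs : List Char) : List (Int × Char) → Bool
  | [] => true
  | (i, c) :: rest =>
    if !(PySem.Chars.isalnum c) && !(c == '_') then false
    else if decide (0 < i) && (c == '_') && (PySem.List.pyGet? cs (i - 1) == some '_') then false
    else vonLoopA cs rest

def valid_org_name (name : String) : Bool :=
  let cs := name.toList
  if cs.length < 4 then false
  else if ((PySem.List.pyGet? cs 0).map PySem.Chars.isdigit).getD false then false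
  else if PySem.List.pyGet? cs (-1) == some '_' then false
  else vonLoopA cs (PySem.List.enumerate cs 0)

-- ===== PORT B =====
-- the four automaton states START, ALNUM, UNDER, DEAD of Source B
inductive VonSt
  | start | alnum | under | dead
deriving DecidableEq

-- _step of Source B, branch for branch
def vonStep (s : VonSt) (c : Char) : VonSt :=
  if s = .dead then .dead
  else if s = .start ∧ PySem.Chars.isdigit c then .dead
  else if PySem.Chars.isalnum c then .alnum
  else if c == '_' then (if s = .under then .dead else .under)
  else .dead

def valid_org_name_alt (name : String) : Bool :=
  let st := name.toList.foldl vonStep .start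
  decide (4 ≤ name.toList.length) && (st == .alnum)

-- ===== PRECONDITION & SPEC =====
def Spec_valid_org_name (name : String) (out : Bool) : Prop := out = valid_org_name_alt name
instance (name : String) (out : Bool) : Decidable (Spec_valid_org_name name out) := by unfold Spec_valid_org_name; infer_instance

-- ===== CLAIM (what is proved, stated in full; the proofs are below) =====
def Claim_equal_valid_org_name : Prop := ∀ (name : String), Dom_valid_org_name name → Spec_valid_org_name name (valid_org_name name)

-- ===== LEMMAS AND PROOFS =====
def pvValid (c : Char) : Bool := PySem.Chars.isalnum c || c == '_'

-- A-side: scan carrying the previous character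
def pvScan : Option Char → List Char → Bool
  | _, [] => true
  | prev, c :: rest =>
    (pvValid c && !((c == '_') && (prev == some '_'))) && pvScan (some c) rest

lemma vonLoopA_eq_scan (suf pre : List Char) :
    vonLoopA (pre ++ suf) (PySem.List.enumerate suf (pre.length : Int)) = pvScan pre.getLast? suf := by
  induction suf generalizing pre with
  | nil => simp [vonLoopA, pvScan, PySem.List.enumerate]
  | cons c rest ih =>
    rw [PySem.List.enumerate_cons, vonLoopA, pvScan]
    have hrec : vonLoopA (pre ++ c :: rest) (PySem.List.enumerate rest ((pre.length : Int) + 1)) = pvScan (some c) rest := by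
      have := ih (pre ++ [c])
      simpa using this
    have hget : (decide (0 < (pre.length : Int)) && (c == '_') && (PySem.List.pyGet? (pre ++ c :: rest) ((pre.length : Int) - 1) == some '_'))
        = ((c == '_') && (pre.getLast? == some '_')) := by
      cases pre with
      | nil => simp
      | cons p ps =>
        have hlen : ((p :: ps).length : Int) - 1 = ((ps.length : Nat) : Int) := by simp
        rw [hlen, PySem.List.pyGet?_natCast]
        have : ((p :: ps) ++ c :: rest)[ps.length]? = (p :: ps).getLast? := by
          rw [List.getElem?_append_left (by simp)]
          rw [List.getLast?_eq_getElem?]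
          simp
        rw [this]
        simp
    rw [hget, hrec]
    by_cases hv : (pvValid c) = true
    · have : (!(PySem.Chars.isalnum c) && !(c == '_')) = false := by
        simp [pvValid] at hv; rcases hv with h|h <;> simp [h]
      rw [this]
      simp only [if_false, Bool.false_eq_true]
      by_cases hu : ((c == '_') && (pre.getLast? == some '_')) = true
      · simp [hu, hv]
      · simp only [Bool.not_eq_true] at hu
        simp [hu, hv]
    · simp only [Bool.not_eq_true] at hv
      have : (!(PySem.Chars.isalnum c) && !(c == '_')) = true := by
        simp [pvValid] at hv; simp [hv.1, hv.2]
      rw [this]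
      simp [hv]

lemma infix_pair_cons (a b c : Char) (rest : List Char) :
    [a, b] <:+: (c :: rest) ↔ (c = a ∧ rest.head? = some b) ∨ [a, b] <:+: rest := by
  rw [List.infix_cons_iff]
  constructor
  · rintro (h | h)
    · left
      rcases List.cons_prefix_cons.mp h with ⟨rfl, h2⟩
      cases rest with
      | nil => simp at h2
      | cons r rs =>
        rcases List.cons_prefix_cons.mp h2 with ⟨rfl, _⟩
        exact ⟨rfl, rfl⟩
    · exact Or.inr h
  · rintro (⟨rfl, h2⟩ | h)
    · left
      cases rest with
      | nil => simp at h2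
      | cons r rs =>
        simp at h2
        subst h2
        exact List.cons_prefix_cons.mpr ⟨rfl, List.cons_prefix_cons.mpr ⟨rfl, List.nil_prefix⟩⟩
    · exact Or.inr h

lemma scan_true_iff (prev : Option Char) (cs : List Char) :
    pvScan prev cs = true ↔
      ((∀ c ∈ cs, pvValid c = true) ∧ ¬(prev = some '_' ∧ cs.head? = some '_') ∧ ¬ ['_', '_'] <:+: cs) := by
  induction cs generalizing prev with
  | nil => simp [pvScan]
  | cons c rest ih =>
    rw [pvScan, Bool.and_eq_true, Bool.and_eq_true, ih]
    rw [infix_pair_cons]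
    constructor
    · rintro ⟨⟨hv, hnb⟩, hall, hh, hinf⟩
      refine ⟨?_, ?_, ?_⟩
      · intro x hx; rcases List.mem_cons.mp hx with rfl | hx
        · exact hv
        · exact hall x hx
      · rintro ⟨hp, hc⟩
        simp at hc
        subst hc
        simp [hp] at hnb
      · rintro (⟨rfl, hb⟩ | h)
        · exact hh ⟨rfl, hb⟩
        · exact hinf h
    · rintro ⟨hall, hph, hinf⟩
      refine ⟨⟨hall c (by simp), ?_⟩, fun x hx => hall x (by simp [hx]), ?_, ?_⟩
      · simp only [Bool.not_eq_true']
        by_cases hc : c = '_'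
        · subst hc
          by_cases hp : prev = some '_'
          · exact absurd ⟨hp, rfl⟩ hph
          · simp [hp]
        · simp [hc]
      · rintro ⟨hc, hh⟩
        exact hinf (Or.inl ⟨by simpa using hc, hh⟩)
      · intro h; exact hinf (Or.inr h)

lemma loop_eq (cs : List Char) :
    vonLoopA cs (PySem.List.enumerate cs 0) = true ↔
      ((∀ c ∈ cs, pvValid c = true) ∧ ¬ ['_', '_'] <:+: cs) := by
  have h := vonLoopA_eq_scan cs []
  simp only [List.nil_append, List.length_nil, Nat.cast_zero, List.getLast?_nil] at h
  rw [h, scan_true_iff]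
  constructor
  · rintro ⟨ha, _, hi⟩; exact ⟨ha, hi⟩
  · rintro ⟨ha, hi⟩; exact ⟨ha, by simp, hi⟩

-- B-side: the dead state absorbs
lemma vonRun_dead (cs : List Char) : cs.foldl vonStep .dead = .dead := by
  induction cs with
  | nil => rfl
  | cons c t ih => simpa [vonStep] using ih

lemma alnum_ne_underscore {c : Char} (h : PySem.Chars.isalnum c = true) : ¬ c = '_' := by
  intro hc; subst hc; exact absurd h (by decide)

-- joint characterisation of the automaton run from the two live non-start states
lemma vonRun_char (cs : List Char) :
    (cs.foldl vonStep VonSt.alnum = VonSt.alnum ↔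
      ((∀ c ∈ cs, pvValid c = true) ∧ ¬ ['_', '_'] <:+: cs ∧ cs.getLast? ≠ some '_'))
  ∧ (cs.foldl vonStep VonSt.under = VonSt.alnum ↔
      ((∀ c ∈ cs, pvValid c = true) ∧ ¬ ['_', '_'] <:+: cs ∧ cs.getLast? ≠ some '_'
        ∧ cs.head? ≠ some '_' ∧ cs ≠ [])) := by
  induction cs with
  | nil => simp
  | cons c t ih =>
    have hlast : ∀ d : Char, (c :: t).getLast? = if t = [] then some c else t.getLast? := by
      intro _; cases t <;> simp [List.getLast?_cons_cons]
    constructor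
    · -- from alnum
      rw [List.foldl_cons]
      by_cases ha : PySem.Chars.isalnum c = true
      · have hstep : vonStep .alnum c = .alnum := by simp [vonStep, ha]
        rw [hstep, ih.1, infix_pair_cons]
        have hcu := alnum_ne_underscore ha
        cases t with
        | nil => simp [pvValid, ha, hcu]
        | cons b u =>
          simp only [List.getLast?_cons_cons, ne_eq, List.forall_mem_cons]
          constructor
          · rintro ⟨hall, hinf, hl⟩
            exact ⟨⟨by simp [pvValid, ha], hall⟩, by rintro (⟨h1, _⟩ | h2); exact hcu h1; exact hinf h2, hl⟩
          · rintro ⟨⟨_, hall⟩, hinf, hl⟩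
            exact ⟨hall, fun h => hinf (Or.inr h), hl⟩
      · by_cases hu : c = '_'
        · subst hu
          have hstep : vonStep .alnum '_' = .under := by decide
          rw [hstep, ih.2, infix_pair_cons]
          cases t with
          | nil => simp
          | cons b u =>
            simp only [List.getLast?_cons_cons, ne_eq, List.forall_mem_cons, List.head?_cons]
            constructor
            · rintro ⟨hall, hinf, hl, hh, _⟩
              refine ⟨⟨by decide, hall⟩, ?_, hl⟩
              rintro (⟨_, h2⟩ | h2)
              · exact hh (by simpa using h2)
              · exact hinf h2
            · rintro ⟨⟨_, hall⟩, hinf, hl⟩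
              refine ⟨hall, fun h => hinf (Or.inr h), hl, ?_, by simp⟩
              intro h; refine hinf (Or.inl ⟨by simp, ?_⟩); simpa using h
        · have hstep : vonStep .alnum c = .dead := by simp [vonStep, ha, hu]
          rw [hstep, vonRun_dead]
          constructor
          · intro h; cases h
          · rintro ⟨hall, _⟩
            have := hall c (by simp)
            simp [pvValid, ha, hu] at this
    · -- from under
      rw [List.foldl_cons]
      by_cases ha : PySem.Chars.isalnum c = true
      · have hstep : vonStep .under c = .alnum := by simp [vonStep, ha]
        rw [hstep, ih.1, infix_pair_cons]
        have hcu := alnum_ne_underscore ha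
        cases t with
        | nil => simp [pvValid, ha, hcu]
        | cons b u =>
          simp only [List.getLast?_cons_cons, ne_eq, List.forall_mem_cons, List.head?_cons]
          constructor
          · rintro ⟨hall, hinf, hl⟩
            exact ⟨⟨by simp [pvValid, ha], hall⟩,
              by rintro (⟨h1, _⟩ | h2); exact hcu h1; exact hinf h2, hl,
              by intro h; exact hcu (by simpa using h), by simp⟩
          · rintro ⟨⟨_, hall⟩, hinf, hl, _, _⟩
            exact ⟨hall, fun h => hinf (Or.inr h), hl⟩
      · by_cases hu : c = '_'
        · subst hu
          have hstep : vonStep .under '_' = .dead := by decide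
          rw [hstep, vonRun_dead]
          constructor
          · intro h; cases h
          · rintro ⟨_, _, _, hh, _⟩; exact (hh (by simp)).elim
        · have hstep : vonStep .under c = .dead := by simp [vonStep, ha, hu]
          rw [hstep, vonRun_dead]
          constructor
          · intro h; cases h
          · rintro ⟨hall, _⟩
            have := hall c (by simp)
            simp [pvValid, ha, hu] at this

-- ===== VERDICT (by name: the statement is the Claim_ definition above) =====
theorem valid_org_name_spec : Claim_equal_valid_org_name := by
  intro name _
  unfold Spec_valid_org_name valid_org_name valid_org_name_alt
  simp only []
  cases hcs : name.toList with
  | nil => simp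
  | cons c t =>
    by_cases h4 : (c :: t).length < 4
    · rw [if_pos h4]
      have h3 : ¬ 3 ≤ t.length := by simp at h4; omega
      simp [h3]
    · rw [if_neg h4]
      have h4' : 4 ≤ (c :: t).length := by omega
      rw [List.foldl_cons]
      by_cases hd : PySem.Chars.isdigit c = true
      · have hstep : vonStep .start c = .dead := by simp [vonStep, hd]
        rw [hstep, vonRun_dead]
        simp [hd]
      · rw [PySem.List.pyGet?_zero_cons]
        simp only [Option.map_some, Option.getD_some, hd, if_false, Bool.false_eq_true]
        rw [PySem.List.pyGet?_neg_one]
        by_cases ha : PySem.Chars.isalnum c = true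
        · have hstep : vonStep .start c = .alnum := by simp [vonStep, hd, ha]
          rw [hstep]
          have hcu := alnum_ne_underscore ha
          by_cases hl : (c :: t).getLast? = some '_'
          · rw [if_pos (by simp [hl])]
            have : t.getLast? = some '_' := by
              cases t with
              | nil => simp at hl; exact absurd hl hcu
              | cons b u => simpa [List.getLast?_cons_cons] using hl
            have hB : t.foldl vonStep VonSt.alnum ≠ VonSt.alnum := by
              intro h
              exact ((vonRun_char t).1.mp h).2.2 this
            simp [hB]
          · rw [if_neg (by simpa using hl)]
            have hl' : t.getLast? ≠ some '_' := by
              cases t with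
              | nil => simp
              | cons b u => simpa [List.getLast?_cons_cons] using hl
            rw [Bool.eq_iff_iff]
            rw [loop_eq]
            simp only [h4', decide_true, Bool.true_and, beq_iff_eq]
            rw [(vonRun_char t).1, infix_pair_cons]
            constructor
            · rintro ⟨hall, hinf⟩
              exact ⟨fun x hx => hall x (by simp [hx]), fun h => hinf (Or.inr h), hl'⟩
            · rintro ⟨hall, hinf, _⟩
              refine ⟨?_, ?_⟩
              · intro x hx; rcases List.mem_cons.mp hx with rfl | hx
                · simp [pvValid, ha]
                · exact hall x hx
              · rintro (⟨h1, _⟩ | h2); exact hcu h1; exact hinf h2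
        · by_cases hu : c = '_'
          · subst hu
            have hstep : vonStep .start '_' = .under := by decide
            rw [hstep]
            by_cases hl : ('_' :: t).getLast? = some '_'
            · rw [if_pos (by simp [hl])]
              have hB : t.foldl vonStep VonSt.under ≠ VonSt.alnum := by
                intro h
                obtain ⟨_, _, hlast, _, hne⟩ := (vonRun_char t).2.mp h
                cases t with
                | nil => exact hne rfl
                | cons b u => exact hlast (by simpa [List.getLast?_cons_cons] using hl)
              simp [hB]
            · rw [if_neg (by simpa using hl)]
              have hne : t ≠ [] := by intro h; subst h; simp at hl
              have hl' : t.getLast? ≠ some '_' := by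
                cases t with
                | nil => simp
                | cons b u => simpa [List.getLast?_cons_cons] using hl
              rw [Bool.eq_iff_iff]
              rw [loop_eq]
              simp only [h4', decide_true, Bool.true_and, beq_iff_eq]
              rw [(vonRun_char t).2, infix_pair_cons]
              constructor
              · rintro ⟨hall, hinf⟩
                refine ⟨fun x hx => hall x (by simp [hx]), fun h => hinf (Or.inr h), hl', ?_, hne⟩
                intro h; refine hinf (Or.inl ⟨by simp, ?_⟩); simpa using h
              · rintro ⟨hall, hinf, _, hh, _⟩
                refine ⟨?_, ?_⟩
                · intro x hx; rcases List.mem_cons.mp hx with rfl | hx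
                  · decide
                  · exact hall x hx
                · rintro (⟨_, h2⟩ | h2)
                  · exact hh (by simpa using h2)
                  · exact hinf h2
          · have hstep : vonStep .start c = .dead := by simp [vonStep, hd, ha, hu]
            rw [hstep, vonRun_dead]
            have hA : ¬ (vonLoopA (c :: t) (PySem.List.enumerate (c :: t) 0) = true) := by
              rw [loop_eq]
              rintro ⟨hall, _⟩
              have := hall c (by simp)
              simp [pvValid, ha, hu] at this
            rw [Bool.not_eq_true] at hA
            rw [show (VonSt.dead == VonSt.alnum) = false from rfl, Bool.and_false]
            split_ifs
            · rfl
            · exact hA
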